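-- pv_equiv track=rewrite | github.com/pypi-data/pypi-mirror-337 | packages/cloe-sql-composer/cloe_sql_composer-0.1.0-py3-none-any.whl/cloe_sql_composer/metadata/snowflake.py | _group_by_table_name
-- ===== SOURCE A (Python) =====
-- def _group_by_table_name(
--     metadata: list[dict[str, str]],
-- ) -> dict[str, list[dict[str, str]]]:
--     grouped = {}
--     for row in metadata:
--         tabname = row.pop("TABLE_NAME")
--         if tabname not in grouped:
--             grouped[tabname] = [row]
--         else:
--             grouped[tabname].append(row)
--
--     return grouped
-- ===== SOURCE B (Python) =====
-- def _group_by_table_name(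
--     metadata: list[dict[str, str]],
-- ) -> dict[str, list[dict[str, str]]]:
--     pairs = [(row.pop("TABLE_NAME"), row) for row in metadata]
--     order = list(dict.fromkeys(k for k, _ in pairs))
--     return {k: [r for k2, r in pairs if k2 == k] for k in order}
-- ===== Notes on version B (the rewrite author's own statement) =====
-- stated objective: alternative
-- what changed: Replaces the single-pass incremental dict grouping with a three-stage pipeline: extract (key,row) pairs, dedup the keys in first-occurrence order, then emit each group by a filtering comprehension.
import Mathlib
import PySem

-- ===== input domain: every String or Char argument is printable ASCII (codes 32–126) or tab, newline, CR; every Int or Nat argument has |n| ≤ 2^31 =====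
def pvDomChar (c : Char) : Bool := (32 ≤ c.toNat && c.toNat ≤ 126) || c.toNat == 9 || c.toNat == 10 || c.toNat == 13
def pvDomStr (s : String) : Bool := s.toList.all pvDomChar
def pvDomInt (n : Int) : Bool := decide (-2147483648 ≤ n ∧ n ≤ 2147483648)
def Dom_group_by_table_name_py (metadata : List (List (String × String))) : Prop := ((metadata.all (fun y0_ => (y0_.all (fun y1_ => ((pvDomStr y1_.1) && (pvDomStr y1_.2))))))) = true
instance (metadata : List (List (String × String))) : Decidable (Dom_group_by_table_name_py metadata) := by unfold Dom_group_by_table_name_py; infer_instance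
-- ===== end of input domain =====

-- B groups by a pairs/dedup/filter pipeline instead of A's incremental dict; equivalence is
-- about the return value (both Pythons pop "TABLE_NAME" from every row of the argument in place).

-- ===== PORT A =====
-- one-pass grouping: grouped is a dict String -> list of rows; row.pop("TABLE_NAME") is
-- get? (none = KeyError, excluded by Pre_) plus erase.
def group_by_table_name_py (metadata : List (List (String × String))) : List (String × List (List (String × String))) :=
  (metadata.foldl
    (fun (grouped : PySem.Dict String (List (List (String × String)))) row =>
      let r := PySem.Dict.mk row
      let tabname := ((r.get? "TABLE_NAME").getD "")
      let rest := (r.erase "TABLE_NAME").items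
      if !grouped.contains tabname then
        grouped.insert tabname [rest]
      else
        grouped.modify tabname [] (fun g => g ++ [rest]))
    PySem.Dict.empty).items

-- ===== PORT B =====
def group_by_table_name_py_alt (metadata : List (List (String × String))) : List (String × List (List (String × String))) :=
  let pairs := metadata.map (fun row =>
    let r := PySem.Dict.mk row
    (((r.get? "TABLE_NAME").getD ""), (r.erase "TABLE_NAME").items))
  let order := PySem.List.dedup (pairs.map Prod.fst)
  order.map (fun k => (k, (pairs.filter (fun p => p.1 == k)).map Prod.snd))

-- ===== PRECONDITION & SPEC =====
-- Pre_ excludes exactly the inputs where row.pop("TABLE_NAME") raises KeyError (a row without that key).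
def Pre_group_by_table_name_py (metadata : List (List (String × String))) : Prop :=
  (metadata.all (fun row => (PySem.Dict.mk row).contains "TABLE_NAME")) = true
instance (metadata : List (List (String × String))) : Decidable (Pre_group_by_table_name_py metadata) := by unfold Pre_group_by_table_name_py; infer_instance
def pvWitness_group_by_table_name_py : (List (List (String × String))) :=
  [[("TABLE_NAME", "t1"), ("COL", "a")], [("TABLE_NAME", "t1"), ("COL", "b")], [("TABLE_NAME", "t2")]]

def Spec_group_by_table_name_py (metadata : List (List (String × String))) (out : List (String × List (List (String × String)))) : Prop := out = group_by_table_name_py_alt metadata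
instance (metadata : List (List (String × String))) (out : List (String × List (List (String × String)))) : Decidable (Spec_group_by_table_name_py metadata out) := by unfold Spec_group_by_table_name_py; infer_instance

-- ===== CLAIM (what is proved, stated in full; the proofs are below) =====
def Claim_equal_group_by_table_name_py : Prop := ∀ (metadata : List (List (String × String))), Dom_group_by_table_name_py metadata → Pre_group_by_table_name_py metadata → Spec_group_by_table_name_py metadata (group_by_table_name_py metadata)

-- ===== LEMMAS AND PROOFS =====

-- the key popped from a row, and the row without it
def pvKey (row : List (String × String)) : String :=
  (((PySem.Dict.mk row).get? "TABLE_NAME").getD "")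
def pvRest (row : List (String × String)) : List (String × String) :=
  ((PySem.Dict.mk row).erase "TABLE_NAME").items

-- A's loop step (insert-or-append) is exactly a modify with default [].
theorem pv_step_eq (grouped : PySem.Dict String (List (List (String × String))))
    (k : String) (v : List (String × String)) :
    (if !grouped.contains k then grouped.insert k [v]
     else grouped.modify k [] (fun g => g ++ [v]))
    = grouped.modify k [] (fun g => g ++ [v]) := by
  by_cases h : grouped.contains k = true
  · simp [h]
  · simp only [Bool.not_eq_true] at h
    simp [h, PySem.Dict.modify, PySem.Dict.getD_of_not_contains _ _ h]

theorem pv_fold_eq (metadata : List (List (String × String))) :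
    metadata.foldl
      (fun (grouped : PySem.Dict String (List (List (String × String)))) row =>
        let r := PySem.Dict.mk row
        let tabname := ((r.get? "TABLE_NAME").getD "")
        let rest := (r.erase "TABLE_NAME").items
        if !grouped.contains tabname then grouped.insert tabname [rest]
        else grouped.modify tabname [] (fun g => g ++ [rest]))
      PySem.Dict.empty
    = metadata.foldl
        (fun grouped row => grouped.modify (pvKey row) [] (fun g => g ++ [pvRest row]))
        PySem.Dict.empty := by
  apply PySem.List.foldl_congr_mem
  intro acc row _
  exact pv_step_eq acc (pvKey row) (pvRest row)

-- ===== VERDICT (by name: the statement is the Claim_ definition above) =====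
theorem group_by_table_name_py_spec : Claim_equal_group_by_table_name_py := by
  intro metadata _ _
  unfold Spec_group_by_table_name_py group_by_table_name_py group_by_table_name_py_alt
  rw [pv_fold_eq]
  have hnd : (metadata.foldl
      (fun (grouped : PySem.Dict String (List (List (String × String)))) row =>
        grouped.modify (pvKey row) [] (fun g => g ++ [pvRest row]))
      PySem.Dict.empty).keys.Nodup := by
    exact PySem.Dict.nodup_keys_foldl_modify_key metadata pvKey []
      (fun _ row => fun g => g ++ [pvRest row]) PySem.Dict.empty (by simp [PySem.Dict.keys_empty])
  rw [PySem.Dict.items_eq_map_keys _ hnd []]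
  rw [PySem.Dict.keys_foldl_modify_key metadata pvKey []
      (fun _ row => fun g => g ++ [pvRest row]) PySem.Dict.empty]
  have hkeys : PySem.Set.update (PySem.Dict.empty :
      PySem.Dict String (List (List (String × String)))).keys (metadata.map pvKey)
      = PySem.List.dedup ((metadata.map (fun row =>
          ((((PySem.Dict.mk row).get? "TABLE_NAME").getD ""),
            ((PySem.Dict.mk row).erase "TABLE_NAME").items))).map Prod.fst) := by
    rw [PySem.List.dedup_eq_ofList, PySem.Set.ofList_eq_foldl]
    simp [PySem.Dict.keys_empty, PySem.Set.update, List.foldl_map, pvKey]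
  rw [hkeys]
  apply List.map_congr_left
  intro k _
  have hfold : metadata.foldl
      (fun (grouped : PySem.Dict String (List (List (String × String)))) row =>
        grouped.modify (pvKey row) [] (fun g => g ++ [pvRest row]))
      PySem.Dict.empty
      = (metadata.map (fun row => (pvKey row, pvRest row))).foldl
        (fun grouped p => grouped.modify p.1 [] (fun g => g ++ [p.2]))
        PySem.Dict.empty := by
    rw [List.foldl_map]
  rw [hfold, PySem.Dict.getD_foldl_modify_append]
  simp [List.filter_map, List.map_map, pvKey, pvRest]
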